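-- pv_equiv track=rewrite | github.com/FantariaW/Python-Practice | CS50P課程練習/Arivia_Daily_Review/Arivia_Day4_6_advanced_dict_list.py | count_department_meal
-- ===== SOURCE A (Python) =====
-- def count_department_meal(department_meal_list):
--     count_both_dict = {}  # 🧠 巢狀 dict：外層是部門，內層是主餐和數量
--
--     for department_meal_dict in department_meal_list:
--         department_key_name = department_meal_dict["Department"]  # 🏢 部門名稱
--         department_key_meal = department_meal_dict["Meal"]         # 🍱 主餐名稱
--
--         if department_key_name not in count_both_dict:
--             count_both_dict[department_key_name] = {}  # 🌱 若部門第一次出現，建立內層 dict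
--
--         if department_key_meal in count_both_dict[department_key_name]:
--             count_both_dict[department_key_name][department_key_meal] += 1  # ➕ 主餐已存在，數量 +1
--         else:
--             count_both_dict[department_key_name][department_key_meal] = 1   # 🌱 主餐第一次出現，設為 1
--
--     return count_both_dict  # 🎁 回傳部門 ➜ 主餐 ➜ 數量 的巢狀 dict 統計表
-- ===== SOURCE B (Python) =====
-- def count_department_meal(department_meal_list):
--     # B: two-pass decomposition — group meals by department first, then count each group.
--     groups = {}
--     for record in department_meal_list:
--         department = record["Department"]
--         meal = record["Meal"]
--         if department in groups:
--             groups[department].append(meal)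
--         else:
--             groups[department] = [meal]
--     result = {}
--     for department, meals in groups.items():
--         counts = {}
--         for meal in meals:
--             counts[meal] = counts.get(meal, 0) + 1
--         result[department] = counts
--     return result
-- ===== Notes on version B (the rewrite author's own statement) =====
-- stated objective: alternative
-- what changed: B replaces A's single interleaved loop (that mutates a nested dict per record) with a two-pass decomposition: first group meals into dept -> list of meals in encounter order, then count each group's list into a plain tally dict.
import Mathlib
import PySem

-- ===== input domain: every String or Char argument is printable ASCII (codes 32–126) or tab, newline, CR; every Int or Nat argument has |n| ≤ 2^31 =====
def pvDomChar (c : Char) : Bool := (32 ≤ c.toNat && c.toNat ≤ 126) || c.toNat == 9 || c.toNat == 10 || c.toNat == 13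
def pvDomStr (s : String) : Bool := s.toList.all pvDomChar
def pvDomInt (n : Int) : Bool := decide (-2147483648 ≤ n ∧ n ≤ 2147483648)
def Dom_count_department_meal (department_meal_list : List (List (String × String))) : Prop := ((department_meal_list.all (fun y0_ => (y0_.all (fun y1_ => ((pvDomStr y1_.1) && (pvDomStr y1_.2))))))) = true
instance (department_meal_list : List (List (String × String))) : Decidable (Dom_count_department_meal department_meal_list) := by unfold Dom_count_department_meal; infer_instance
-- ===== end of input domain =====

-- B replaces A's single interleaved loop (nested-dict mutation per record) by a two-pass
-- decomposition: group meals per department, then count each group; equal return values on Pre_.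

-- ===== PORT A =====
-- rec["key"] on a dict record (first match); the "" default is reached only off Pre_, where Python raises KeyError
def pvRecGet (rec : List (String × String)) (k : String) : String :=
  ((PySem.Dict.mk rec).get? k).getD ""

-- loop body of A: one record updates the nested dict exactly as the Python loop does
def countA_step (d : PySem.Dict String (PySem.Dict String Int)) (rec : List (String × String)) :
    PySem.Dict String (PySem.Dict String Int) :=
  let dept := pvRecGet rec "Department"
  let meal := pvRecGet rec "Meal"
  let d := if d.contains dept then d else d.insert dept PySem.Dict.empty
  let inner := d.getD dept PySem.Dict.empty
  let inner' := if inner.contains meal then inner.modify meal 0 (· + 1) else inner.insert meal 1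
  d.insert dept inner'

def count_department_meal (department_meal_list : List (List (String × String))) :
    List (String × List (String × Int)) :=
  (department_meal_list.foldl countA_step PySem.Dict.empty).items.map (fun p => (p.1, p.2.items))

-- ===== PORT B =====
-- first pass of B: group meals by department, in encounter order
def countB_group_step (g : PySem.Dict String (List String)) (rec : List (String × String)) :
    PySem.Dict String (List String) :=
  let dept := pvRecGet rec "Department"
  let meal := pvRecGet rec "Meal"
  if g.contains dept then g.modify dept [] (· ++ [meal]) else g.insert dept [meal]

def count_department_meal_alt (department_meal_list : List (List (String × String))) :
    List (String × List (String × Int)) :=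
  let groups := department_meal_list.foldl countB_group_step PySem.Dict.empty
  let result := groups.items.foldl
    (fun r p => r.insert p.1 (p.2.foldl (fun c m => c.insert m (c.getD m 0 + 1)) PySem.Dict.empty))
    PySem.Dict.empty
  result.items.map (fun p => (p.1, p.2.items))

-- ===== PRECONDITION & SPEC =====
-- Pre_: every record has the keys "Department" and "Meal" (otherwise Python A raises KeyError)
def Pre_count_department_meal (department_meal_list : List (List (String × String))) : Prop :=
  ∀ rec ∈ department_meal_list,
    (PySem.Dict.mk rec).contains "Department" = true ∧ (PySem.Dict.mk rec).contains "Meal" = true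
instance (department_meal_list : List (List (String × String))) : Decidable (Pre_count_department_meal department_meal_list) := by unfold Pre_count_department_meal; infer_instance

def pvWitness_count_department_meal : (List (List (String × String))) :=
  [[("Department", "HR"), ("Meal", "rice")], [("Department", "HR"), ("Meal", "rice")]]

def Spec_count_department_meal (department_meal_list : List (List (String × String))) (out : List (String × List (String × Int))) : Prop := out = count_department_meal_alt department_meal_list
instance (department_meal_list : List (List (String × String))) (out : List (String × List (String × Int))) : Decidable (Spec_count_department_meal department_meal_list out) := by unfold Spec_count_department_meal; infer_instance

-- ===== CLAIM (what is proved, stated in full; the proofs are below) =====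
def Claim_equal_count_department_meal : Prop := ∀ (department_meal_list : List (List (String × String))), Dom_count_department_meal department_meal_list → Pre_count_department_meal department_meal_list → Spec_count_department_meal department_meal_list (count_department_meal department_meal_list)

-- ===== LEMMAS AND PROOFS =====

-- map a grouping dict to the corresponding counting dict (proof-only device)
def pvTransform (g : PySem.Dict String (List String)) : PySem.Dict String (PySem.Dict String Int) :=
  PySem.Dict.mk (g.items.map (fun p => (p.1, PySem.Dict.counter p.2)))

theorem pvTransform_contains (g : PySem.Dict String (List String)) (k : String) :
    (pvTransform g).contains k = g.contains k := by
  simp [pvTransform, PySem.Dict.contains, List.any_map, Function.comp_def]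

theorem pvTransform_get? (g : PySem.Dict String (List String)) (k : String) :
    (pvTransform g).get? k = (g.get? k).map PySem.Dict.counter := by
  simp only [pvTransform, PySem.Dict.get?, List.find?_map, Function.comp_def]
  cases List.find? (fun p => p.1 == k) g.items <;> rfl

theorem pvTransform_getD (g : PySem.Dict String (List String)) (k : String) :
    (pvTransform g).getD k PySem.Dict.empty = PySem.Dict.counter (g.getD k []) := by
  simp only [PySem.Dict.getD, pvTransform_get?]
  cases g.get? k <;> rfl

theorem pvTransform_insert (g : PySem.Dict String (List String)) (k : String) (v : List String) :
    pvTransform (g.insert k v) = (pvTransform g).insert k (PySem.Dict.counter v) := by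
  apply PySem.Dict.ext
  have hc : (pvTransform g).contains k = g.contains k := pvTransform_contains g k
  show (PySem.Dict.mk ((g.insert k v).items.map (fun p => (p.1, PySem.Dict.counter p.2)))).items
      = ((pvTransform g).insert k (PySem.Dict.counter v)).items
  rw [PySem.Dict.items_insert, PySem.Dict.items_insert, hc]
  by_cases h : g.contains k = true
  · simp only [h, if_pos, pvTransform, List.map_map]
    apply List.map_congr_left
    intro p _
    by_cases hp : p.1 = k <;> simp [hp]
  · simp [h, pvTransform]

theorem inner_step_eq_modify (inner : PySem.Dict String Int) (m : String) :
    (if inner.contains m then inner.modify m 0 (· + 1) else inner.insert m 1) =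
      inner.modify m 0 (· + 1) := by
  by_cases h : inner.contains m = true
  · simp [h]
  · have hb : inner.contains m = false := by simpa using h
    simp [h, PySem.Dict.modify, PySem.Dict.getD_of_not_contains _ _ hb]

theorem countB_step_eq_insert (g : PySem.Dict String (List String)) (rec : List (String × String)) :
    countB_group_step g rec =
      g.insert (pvRecGet rec "Department")
        (g.getD (pvRecGet rec "Department") [] ++ [pvRecGet rec "Meal"]) := by
  unfold countB_group_step
  by_cases h : g.contains (pvRecGet rec "Department") = true
  · simp [h, PySem.Dict.modify]
  · have hb : g.contains (pvRecGet rec "Department") = false := by simpa using h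
    simp [h, PySem.Dict.getD_of_not_contains _ _ hb]

theorem countA_step_transform (g : PySem.Dict String (List String)) (rec : List (String × String)) :
    countA_step (pvTransform g) rec = pvTransform (countB_group_step g rec) := by
  rw [countB_step_eq_insert, pvTransform_insert, PySem.Dict.counter_append_singleton]
  unfold countA_step
  set dept := pvRecGet rec "Department" with hd
  set meal := pvRecGet rec "Meal" with hm
  by_cases h : g.contains dept = true
  · have h' : (pvTransform g).contains dept = true := by rw [pvTransform_contains]; exact h
    simp only [h', if_pos, inner_step_eq_modify, pvTransform_getD]
  · have h' : (pvTransform g).contains dept = false := by rw [pvTransform_contains]; simpa using h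
    have hg : g.getD dept [] = [] := PySem.Dict.getD_of_not_contains _ _ (by simpa using h)
    simp only [h', Bool.false_eq_true, if_false, inner_step_eq_modify,
      PySem.Dict.getD_insert_self, PySem.Dict.insert_insert_self, hg]
    rfl

theorem foldA_eq_transform_foldB (l : List (List (String × String)))
    (g : PySem.Dict String (List String)) :
    l.foldl countA_step (pvTransform g) = pvTransform (l.foldl countB_group_step g) := by
  induction l generalizing g with
  | nil => rfl
  | cons r t ih => simp only [List.foldl_cons, countA_step_transform, ih]

theorem groups_keys_nodup (l : List (List (String × String))) :
    (l.foldl countB_group_step PySem.Dict.empty).keys.Nodup := by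
  have hstep : countB_group_step =
      fun (g : PySem.Dict String (List String)) rec =>
        g.insert (pvRecGet rec "Department")
          (g.getD (pvRecGet rec "Department") [] ++ [pvRecGet rec "Meal"]) := by
    funext g rec; exact countB_step_eq_insert g rec
  rw [hstep]
  exact PySem.Dict.nodup_keys_foldl_insert_key l (fun rec => pvRecGet rec "Department")
    (fun g rec => g.getD (pvRecGet rec "Department") [] ++ [pvRecGet rec "Meal"])
    PySem.Dict.empty (by simp)

theorem alt_eq_map_counter (l : List (List (String × String))) :
    count_department_meal_alt l =
      (l.foldl countB_group_step PySem.Dict.empty).items.map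
        (fun p => (p.1, (PySem.Dict.counter p.2).items)) := by
  show ((l.foldl countB_group_step PySem.Dict.empty).items.foldl
      (fun r p => r.insert p.1 (p.2.foldl (fun c m => c.insert m (c.getD m 0 + 1)) PySem.Dict.empty))
      (PySem.Dict.empty : PySem.Dict String (PySem.Dict String Int))).items.map
        (fun p => (p.1, p.2.items)) = _
  simp only [PySem.Dict.foldl_insert_getD_add_one_eq_counter]
  have h1 : ∀ a ∈ (l.foldl countB_group_step PySem.Dict.empty).items,
      (PySem.Dict.empty : PySem.Dict String (PySem.Dict String Int)).contains a.1 = false := by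
    intro a _
    simp [PySem.Dict.contains, PySem.Dict.empty]
  have hit := PySem.Dict.items_foldl_insert_fresh
      (l.foldl countB_group_step PySem.Dict.empty).items (fun p => p.1)
      (fun p => PySem.Dict.counter p.2) PySem.Dict.empty h1 (groups_keys_nodup l)
  rw [hit]
  simp [List.map_map, Function.comp_def, PySem.Dict.empty]

-- ===== VERDICT (by name: the statement is the Claim_ definition above) =====
theorem count_department_meal_spec : Claim_equal_count_department_meal := by
  intro l _ _
  unfold Spec_count_department_meal
  rw [alt_eq_map_counter]
  show (l.foldl countA_step (pvTransform PySem.Dict.empty)).items.map (fun p => (p.1, p.2.items)) = _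
  rw [foldA_eq_transform_foldB]
  simp [pvTransform, List.map_map, Function.comp_def]
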